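-- pv_equiv track=rewrite | github.com/alihacks/advent-of-code | Python/06/solution.py | partOne
-- ===== SOURCE A (Python) =====
-- from typing import List
--
-- def parse(instr: str) -> List:
--     forms = []
--     current = []
--     for line in instr.splitlines():
--         if not line:  # break, add what we have
--             forms.append(current)
--             current = []
--         else:
--             current.append(line)
--     # Add last form
--     forms.append(current)
--     return forms
--
-- def partOne(instr: str) -> int:
--     forms = parse(instr)
--     cnt = 0
--     for form in forms:
--         form_set = set()
--         for answer in form:
--             form_set = form_set.union(set(answer))
--         cnt += len(form_set)
--     return cnt
-- ===== SOURCE B (Python) =====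
-- def partOne(instr: str) -> int:
--     cnt = 0
--     cur = set()
--     for line in instr.splitlines():
--         if not line:
--             cnt += len(cur)
--             cur = set()
--         else:
--             cur |= set(line)
--     return cnt + len(cur)
-- ===== Notes on version B (the rewrite author's own statement) =====
-- stated objective: simpler
-- what changed: Replaces the two-phase design (build a list of groups, then a nested loop unioning each group's sets) with a single streaming pass that keeps one running set and a counter, flushing on blank lines.
import Mathlib
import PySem

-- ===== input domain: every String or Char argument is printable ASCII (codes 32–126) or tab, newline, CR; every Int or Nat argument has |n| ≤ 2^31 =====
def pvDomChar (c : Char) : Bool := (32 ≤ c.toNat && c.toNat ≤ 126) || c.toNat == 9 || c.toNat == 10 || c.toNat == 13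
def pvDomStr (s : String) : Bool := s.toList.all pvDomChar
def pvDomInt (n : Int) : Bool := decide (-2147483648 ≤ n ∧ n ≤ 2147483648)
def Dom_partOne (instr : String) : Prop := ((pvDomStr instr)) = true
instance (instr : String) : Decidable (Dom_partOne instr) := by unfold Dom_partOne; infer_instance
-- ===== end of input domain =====

-- B replaces A's two-phase design (parse into a list of groups, then nested loops unioning
-- each group's character sets) with a single streaming pass keeping a running set and counter.

-- ===== PORT A =====
-- parse: builds the list of line groups separated by blank lines
def pvParse (instr : String) : List (List String) :=
  let st := (PySem.Str.splitlines instr).foldl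
    (fun (st : List (List String) × List String) line =>
      if line = "" then (st.1 ++ [st.2], []) else (st.1, st.2 ++ [line]))
    ([], [])
  st.1 ++ [st.2]

def partOne (instr : String) : Int :=
  (pvParse instr).foldl
    (fun cnt form =>
      cnt + PySem.Set.len
        (form.foldl (fun s ans => PySem.Set.union s (PySem.Set.ofList ans.toList))
          PySem.Set.empty))
    0

-- ===== PORT B =====
def partOne_alt (instr : String) : Int :=
  let st := (PySem.Str.splitlines instr).foldl
    (fun (st : Int × PySem.Set Char) line =>
      if line = "" then (st.1 + PySem.Set.len st.2, PySem.Set.empty)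
      else (st.1, PySem.Set.union st.2 (PySem.Set.ofList line.toList)))
    ((0 : Int), PySem.Set.empty)
  st.1 + PySem.Set.len st.2

-- ===== PRECONDITION & SPEC =====
def Spec_partOne (instr : String) (out : Int) : Prop := out = partOne_alt instr
instance (instr : String) (out : Int) : Decidable (Spec_partOne instr out) := by unfold Spec_partOne; infer_instance

-- ===== CLAIM (what is proved, stated in full; the proofs are below) =====
def Claim_equal_partOne : Prop := ∀ (instr : String), Dom_partOne instr → Spec_partOne instr (partOne instr)

-- ===== LEMMAS AND PROOFS =====

-- the set A computes for one group
def pvGroupSet (form : List String) : PySem.Set Char :=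
  form.foldl (fun s ans => PySem.Set.union s (PySem.Set.ofList ans.toList)) PySem.Set.empty

-- the count A accumulates over a list of groups
def pvCount (forms : List (List String)) : Int :=
  forms.foldl (fun cnt form => cnt + PySem.Set.len (pvGroupSet form)) 0

lemma pvCount_shift (gs : List (List String)) :
    ∀ c : Int,
      gs.foldl (fun cnt form => cnt + PySem.Set.len (pvGroupSet form)) c = c + pvCount gs := by
  induction gs with
  | nil => intro c; simp [pvCount]
  | cons g t ih =>
    intro c
    simp only [pvCount, List.foldl_cons] at *
    rw [ih, ih (0 + _)]
    ring

lemma pvCount_append (fs gs : List (List String)) :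
    pvCount (fs ++ gs) = pvCount fs + pvCount gs := by
  unfold pvCount
  rw [List.foldl_append, pvCount_shift]
  rfl

lemma pvGroupSet_append_singleton (form : List String) (line : String) :
    pvGroupSet (form ++ [line])
      = PySem.Set.union (pvGroupSet form) (PySem.Set.ofList line.toList) := by
  unfold pvGroupSet
  rw [List.foldl_append]
  rfl

-- main invariant: the streaming fold agrees with parse-then-count, for any start state
lemma pvMain (lines : List String) (forms : List (List String)) (current : List String) :
    (lines.foldl
        (fun (st : Int × PySem.Set Char) line =>
          if line = "" then (st.1 + PySem.Set.len st.2, PySem.Set.empty)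
          else (st.1, PySem.Set.union st.2 (PySem.Set.ofList line.toList)))
        (pvCount forms, pvGroupSet current)).1
      + PySem.Set.len (lines.foldl
        (fun (st : Int × PySem.Set Char) line =>
          if line = "" then (st.1 + PySem.Set.len st.2, PySem.Set.empty)
          else (st.1, PySem.Set.union st.2 (PySem.Set.ofList line.toList)))
        (pvCount forms, pvGroupSet current)).2
    = pvCount ((lines.foldl
        (fun (st : List (List String) × List String) line =>
          if line = "" then (st.1 ++ [st.2], []) else (st.1, st.2 ++ [line]))
        (forms, current)).1
        ++ [(lines.foldl
        (fun (st : List (List String) × List String) line =>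
          if line = "" then (st.1 ++ [st.2], []) else (st.1, st.2 ++ [line]))
        (forms, current)).2]) := by
  induction lines generalizing forms current with
  | nil =>
    simp only [List.foldl_nil]
    rw [pvCount_append]
    unfold pvCount
    simp
  | cons line rest ih =>
    by_cases h : line = ""
    · subst h
      simp only [List.foldl_cons, reduceIte]
      rw [show (pvCount forms + PySem.Set.len (pvGroupSet current), (PySem.Set.empty : PySem.Set Char))
            = (pvCount (forms ++ [current]), pvGroupSet []) from by
          simp [pvCount, pvGroupSet]]
      exact ih (forms ++ [current]) []
    · simp only [List.foldl_cons, if_neg h]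
      rw [show (PySem.Set.union (pvGroupSet current) (PySem.Set.ofList line.toList))
            = pvGroupSet (current ++ [line]) from (pvGroupSet_append_singleton current line).symm]
      exact ih forms (current ++ [line])

-- ===== VERDICT (by name: the statement is the Claim_ definition above) =====
theorem partOne_spec : Claim_equal_partOne := by
  intro instr _
  unfold Spec_partOne
  have h := pvMain (PySem.Str.splitlines instr) [] []
  simp only [partOne, partOne_alt, pvParse, pvCount, pvGroupSet, List.foldl_nil] at h ⊢
  exact h.symm
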